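-- pv_equiv track=rewrite | github.com/BackdoorAli/linux-less-persistence | src/llp/checks/systemd.py | _extract_exec_path
-- ===== SOURCE A (Python) =====
-- from typing import List, Optional, Tuple, Dict
--
-- def _extract_exec_path(execstart_raw: str) -> Optional[str]:
--     if "path=" in execstart_raw:
--         idx = execstart_raw.find("path=")
--         sub = execstart_raw[idx + 5 :]
--         for sep in [" ", ";", "}", ","]:
--             if sep in sub:
--                 sub = sub.split(sep, 1)[0]
--         return sub if sub.startswith("/") else None
--     parts = execstart_raw.split()
--     return parts[0] if parts and parts[0].startswith("/") else None
-- ===== SOURCE B (Python) =====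
-- def _extract_exec_path(execstart_raw):
--     if "path=" in execstart_raw:
--         sub = execstart_raw[execstart_raw.find("path=") + 5:]
--         head = []
--         for ch in sub:
--             if ch in " ;},":
--                 break
--             head.append(ch)
--         head = "".join(head)
--         return head if head.startswith("/") else None
--     parts = execstart_raw.split()
--     return parts[0] if parts and parts[0].startswith("/") else None
-- ===== Notes on version B (the rewrite author's own statement) =====
-- stated objective: simpler
-- what changed: The path= branch's four sequential split(sep, 1) passes are replaced by a single left-to-right scan that collects characters until the first separator (' ', ';', '}', ','), i.e. one takeWhile instead of four splits.
import Mathlib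
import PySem

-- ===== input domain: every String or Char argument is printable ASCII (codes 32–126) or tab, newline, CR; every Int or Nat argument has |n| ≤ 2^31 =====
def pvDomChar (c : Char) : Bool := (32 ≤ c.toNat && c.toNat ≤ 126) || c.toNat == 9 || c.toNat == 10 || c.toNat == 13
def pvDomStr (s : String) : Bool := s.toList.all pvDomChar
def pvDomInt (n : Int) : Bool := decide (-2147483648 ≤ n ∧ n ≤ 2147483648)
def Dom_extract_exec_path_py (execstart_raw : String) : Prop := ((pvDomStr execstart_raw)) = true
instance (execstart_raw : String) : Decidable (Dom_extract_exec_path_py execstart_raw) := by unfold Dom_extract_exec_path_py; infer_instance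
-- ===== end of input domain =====

-- B replaces the four sequential split(sep, 1) passes of the path= branch by one
-- left-to-right scan that stops at the first separator character (objective: simpler).

-- ===== PORT A =====
-- sub.split(sep, 1)[0]: split never returns an empty list and sep is never empty
-- here, so the getD/headD defaults are unreachable.
def pySplitFirst (s sep : String) : String :=
  ((PySem.Str.splitMax? s sep 1).getD []).headD ""

-- one iteration of A's `for sep in [" ", ";", "}", ","]` body
def stepA (sub sep : String) : String :=
  if PySem.Str.isIn sep sub then pySplitFirst sub sep else sub

def extract_exec_path_py (execstart_raw : String) : Option String :=
  if PySem.Str.isIn "path=" execstart_raw then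
    let idx := PySem.Str.find execstart_raw "path="
    let sub := PySem.Str.slice execstart_raw (some (idx + 5)) none
    let sub := [" ", ";", "}", ","].foldl stepA sub
    if PySem.Str.startswith sub "/" then some sub else none
  else
    let parts := PySem.Str.split₀ execstart_raw
    if (!parts.isEmpty) && PySem.Str.startswith (parts.headD "") "/" then
      some (parts.headD "") else none

-- ===== PORT B =====
def isSepB (c : Char) : Bool := c == ' ' || c == ';' || c == '}' || c == ','

def extract_exec_path_py_alt (execstart_raw : String) : Option String :=
  if PySem.Str.isIn "path=" execstart_raw then
    let sub := PySem.Str.slice execstart_raw (some (PySem.Str.find execstart_raw "path=" + 5)) none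
    -- the for/break/append loop collects the prefix of sub before the first separator
    let head := String.ofList (sub.toList.takeWhile (fun c => !isSepB c))
    if PySem.Str.startswith head "/" then some head else none
  else
    match PySem.Str.split₀ execstart_raw with
    | [] => none
    | p :: _ => if PySem.Str.startswith p "/" then some p else none

-- ===== PRECONDITION & SPEC =====
def Spec_extract_exec_path_py (execstart_raw : String) (out : Option String) : Prop := out = extract_exec_path_py_alt execstart_raw
instance (execstart_raw : String) (out : Option String) : Decidable (Spec_extract_exec_path_py execstart_raw out) := by unfold Spec_extract_exec_path_py; infer_instance

-- ===== CLAIM (what is proved, stated in full; the proofs are below) =====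
def Claim_equal_extract_exec_path_py : Prop := ∀ (execstart_raw : String), Dom_extract_exec_path_py execstart_raw → Spec_extract_exec_path_py execstart_raw (extract_exec_path_py execstart_raw)

-- ===== LEMMAS AND PROOFS =====

lemma go_zero (c : Char) (fuel : Nat) (l cur : List Char) (acc : List (List Char)) :
    PySem.Chars.splitOnMax.go [c] fuel 0 l cur acc = ((cur.reverse ++ l) :: acc).reverse := by
  cases fuel with
  | zero => simp [PySem.Chars.splitOnMax.go]
  | succ n => cases l <;> simp [PySem.Chars.splitOnMax.go]

lemma go_ex (c : Char) : ∀ (fuel : Nat) (l cur : List Char) (acc : List (List Char)), l.length < fuel →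
    ∃ t, PySem.Chars.splitOnMax.go [c] fuel 1 l cur acc
       = acc.reverse ++ (cur.reverse ++ l.takeWhile (fun x => !(x == c))) :: t := by
  intro fuel
  induction fuel with
  | zero => intro l cur acc h; omega
  | succ n ih =>
    intro l cur acc h
    cases l with
    | nil => exact ⟨[], by simp [PySem.Chars.splitOnMax.go]⟩
    | cons c' rest =>
      by_cases hc : c' = c
      · subst hc
        refine ⟨[rest], ?_⟩
        simp [PySem.Chars.splitOnMax.go, List.isPrefixOf, go_zero]
      · obtain ⟨t, ht⟩ := ih rest (c' :: cur) acc (by simp at h ⊢; omega)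
        refine ⟨t, ?_⟩
        rw [show PySem.Chars.splitOnMax.go [c] (n+1) 1 (c'::rest) cur acc
             = PySem.Chars.splitOnMax.go [c] n 1 rest (c'::cur) acc from by
           simp [PySem.Chars.splitOnMax.go, List.isPrefixOf]
           intro h'; exact absurd h'.symm hc, ht]
        simp [hc]

lemma singleton_infix_iff (c : Char) (l : List Char) : [c] <:+: l ↔ c ∈ l := by
  constructor
  · rintro ⟨p, q, rfl⟩; simp
  · intro h; obtain ⟨p, q, rfl⟩ := List.mem_iff_append.mp h; exact ⟨p, q, by simp⟩

-- A's loop body, for a single-character separator, is exactly a takeWhile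
lemma stepA_eq (sub sep : String) (c : Char) (hsep : sep.toList = [c]) :
    stepA sub sep = String.ofList (sub.toList.takeWhile (fun x => !(x == c))) := by
  by_cases hin : PySem.Str.isIn sep sub
  · obtain ⟨t, ht⟩ := go_ex c (sub.length + 1) sub.toList [] []
      (by rw [String.length_toList]; omega)
    simp only [stepA, hin, if_pos, pySplitFirst, PySem.Str.splitMax?,
      PySem.Chars.splitMax?, hsep, PySem.Chars.splitOnMax]
    norm_num
    rw [ht]
    simp
  · have hmem : c ∉ sub.toList := by
      intro hm
      exact hin (by
        rw [show PySem.Str.isIn sep sub = PySem.Chars.isIn sep.toList sub.toList from rfl, hsep]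
        exact (PySem.Chars.isIn_iff_infix _ _).mpr ((singleton_infix_iff c _).mpr hm))
    simp only [stepA, hin, if_neg, Bool.false_eq_true, not_false_iff, if_neg]
    rw [List.takeWhile_eq_self_iff.mpr (by intro x hx; simp; intro he; exact hmem (he ▸ hx)),
      String.ofList_toList]

lemma takeWhile_ext (p q : Char → Bool) (h : ∀ x, p x = q x) (l : List Char) :
    l.takeWhile p = l.takeWhile q := by
  rw [funext h]

-- the whole four-separator loop is one takeWhile with the disjunction predicate
lemma foldl_stepA_eq (s : String) :
    [" ", ";", "}", ","].foldl stepA s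
      = String.ofList (s.toList.takeWhile (fun c => !isSepB c)) := by
  simp only [List.foldl]
  rw [stepA_eq _ " " ' ' rfl, stepA_eq _ ";" ';' rfl, stepA_eq _ "}" '}' rfl,
      stepA_eq _ "," ',' rfl]
  simp only [String.toList_ofList, List.takeWhile_takeWhile]
  congr 1
  apply takeWhile_ext
  intro x
  simp only [isSepB, Bool.not_or]
  by_cases h1 : x = ' ' <;> by_cases h2 : x = ';' <;> by_cases h3 : x = '}' <;>
    by_cases h4 : x = ',' <;> simp [h1, h2, h3, h4]

-- ===== VERDICT (by name: the statement is the Claim_ definition above) =====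
theorem extract_exec_path_py_spec : Claim_equal_extract_exec_path_py := by
  intro s _
  unfold Spec_extract_exec_path_py extract_exec_path_py extract_exec_path_py_alt
  by_cases hin : PySem.Str.isIn "path=" s
  · simp only [hin, if_pos, foldl_stepA_eq]
  · simp only [hin, Bool.false_eq_true, not_false_iff, if_neg]
    cases PySem.Str.split₀ s with
    | nil => simp
    | cons p rest => simp
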